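-- pv_equiv track=rewrite | github.com/lilindu/cryo-tdk-killers | relabel_tree_with_lineage.py | relabel_newick_leaves_with_records
-- ===== SOURCE A (Python) =====
-- from typing import Dict, List, Tuple, Optional
--
-- def relabel_newick_leaves_with_records(newick_text: str, mapping: Dict[str, str]) -> Tuple[str, List[Dict[str, str]]]:
--     """
--     Relabel leaf names in a Newick string and collect per-leaf reporting records.
--
--     This function performs the same tokenization and replacement as
--     `relabel_newick_leaves`, but additionally collects a record for each leaf
--     containing:
--     - original leaf node label
--     - whether the original leaf node label has mnemonic (yes/no)
--     - current leaf node label (after potential relabeling)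
--     - lineage information in the current leaf node label (mapping value used)
--
--     Args:
--         newick_text: Original Newick content as a single-line string.
--         mapping: Dict of mnemonic -> lineage label.
--
--     Returns:
--         A tuple of (modified Newick string, list of records for TSV reporting).
--     """
--     out_chars: List[str] = []
--     i = 0
--     n = len(newick_text)
--     expecting_label = False
--     records: List[Dict[str, str]] = []
--
--     # Precompute keys sorted by length (longest first) to avoid partial matches
--     keys_sorted = sorted(mapping.keys(), key=len, reverse=True)
--
--     while i < n:
--         ch = newick_text[i]
--         out_chars.append(ch)
--
--         if ch == '(' or ch == ',':
--             expecting_label = True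
--             i += 1
--             if i < n and newick_text[i] in '(),':
--                 expecting_label = False
--             else:
--                 start = i
--                 while i < n and newick_text[i] not in ':,)':
--                     i += 1
--                 token = newick_text[start:i]
--
--                 # Determine if token includes any mnemonic and perform replacement
--                 has_mnemonic = False
--                 used_lineage = ""
--                 replaced = token
--                 for key in keys_sorted:
--                     if key and key in token:
--                         has_mnemonic = True
--                         # Replace mnemonic with lineage label
--                         replaced = token.replace(key, mapping.get(key, key))
--                         used_lineage = mapping.get(key, "")
--                         break
--
--                 out_chars.append(replaced)
--
--                 # Collect reporting record
--                 records.append({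
--                     "original leaf node label": token,
--                     "whether the original leaf node label has mnemonic": "yes" if has_mnemonic else "no",
--                     "current leaf node label": replaced,
--                     "lineage information in the current leaf node label": used_lineage,
--                 })
--
--                 expecting_label = False
--                 continue
--         else:
--             expecting_label = False
--             i += 1
--
--     return "".join(out_chars), records
-- ===== SOURCE B (Python) =====
-- from typing import Dict, List, Tuple
--
-- def relabel_newick_leaves_with_records(newick_text: str, mapping: Dict[str, str]) -> Tuple[str, List[Dict[str, str]]]:
--     """Two-phase re-implementation: (1) tokenize the Newick text into pieces
--     (literal characters and leaf tokens), (2) relabel each leaf token by the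
--     longest matching mnemonic found in one max-scan over the mapping keys
--     (no sort), splicing replacements into the output."""
--     # phase 1: tokenize into pieces ('lit', ch) / ('tok', token)
--     pieces = []
--     n = len(newick_text)
--     i = 0
--     while i < n:
--         ch = newick_text[i]
--         pieces.append(('lit', ch))
--         i += 1
--         if ch in '(,':
--             if i < n and newick_text[i] in '(),':
--                 continue
--             j = i
--             while j < n and newick_text[j] not in ':,)':
--                 j += 1
--             pieces.append(('tok', newick_text[i:j]))
--             i = j
--
--     def best_key(token):
--         # longest non-empty mnemonic occurring in token; first in insertion
--         # order among equally long ones (== what a stable longest-first sort picks)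
--         best = None
--         for k in mapping:
--             if k and k in token and (best is None or len(best) < len(k)):
--                 best = k
--         return best
--
--     def render(piece):
--         kind, s = piece
--         if kind == 'lit':
--             return s
--         b = best_key(s)
--         return s if b is None else s.replace(b, mapping[b])
--
--     out = ''.join(render(p) for p in pieces)
--
--     records = []
--     for kind, s in pieces:
--         if kind != 'tok':
--             continue
--         b = best_key(s)
--         if b is None:
--             records.append({
--                 "original leaf node label": s,
--                 "whether the original leaf node label has mnemonic": "no",
--                 "current leaf node label": s,
--                 "lineage information in the current leaf node label": "",
--             })
--         else:
--             val = mapping[b]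
--             records.append({
--                 "original leaf node label": s,
--                 "whether the original leaf node label has mnemonic": "yes",
--                 "current leaf node label": s.replace(b, val),
--                 "lineage information in the current leaf node label": val,
--             })
--     return out, records
-- ===== Notes on version B (the rewrite author's own statement) =====
-- stated objective: alternative
-- what changed: B splits A's fused character loop into a tokenize phase plus a render/report phase over the resulting pieces, and replaces A's longest-first sort of the mnemonic keys followed by a first-match scan with a single sort-free max-scan that picks the longest matching key directly (first in insertion order on ties).
import Mathlib
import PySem

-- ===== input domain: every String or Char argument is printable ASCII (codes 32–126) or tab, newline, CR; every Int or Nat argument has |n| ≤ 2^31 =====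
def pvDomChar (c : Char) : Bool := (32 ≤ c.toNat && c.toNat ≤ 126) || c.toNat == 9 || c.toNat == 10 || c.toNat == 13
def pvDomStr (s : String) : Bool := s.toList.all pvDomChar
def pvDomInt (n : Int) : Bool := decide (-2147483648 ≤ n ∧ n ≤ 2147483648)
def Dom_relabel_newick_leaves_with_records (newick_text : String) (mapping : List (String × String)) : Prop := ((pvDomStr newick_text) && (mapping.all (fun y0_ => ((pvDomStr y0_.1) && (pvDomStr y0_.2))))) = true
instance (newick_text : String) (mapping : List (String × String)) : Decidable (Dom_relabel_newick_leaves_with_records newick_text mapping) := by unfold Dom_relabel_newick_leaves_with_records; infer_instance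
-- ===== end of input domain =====

-- B replaces A's per-token "longest-first sorted keys, take first match" scan by a sort-free
-- single max-scan over the mapping keys, and splits A's fused loop into a tokenize phase plus
-- a render/report phase over the resulting pieces (objective: alternative decomposition, no sort).

-- ===== PORT A =====
-- shared character classes of the Python string literals '(),' and ':,)'
def pvIsLCR (c : Char) : Bool := c == '(' || c == ')' || c == ','
def pvTokStop (c : Char) : Bool := c == ':' || c == ',' || c == ')'

-- the while-loop of A: i/newick_text[i:] becomes structural recursion on the remaining chars,
-- the inner token while-loop is the takeWhile over the same stop set
-- the for-break over keys_sorted: first key with (key and key in token), and the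
-- has_mnemonic/replaced/used_lineage triple it leaves behind
def pvScanKeysA (d : PySem.Dict String String) (keysSorted : List String) (token : String) :
    Bool × String × String :=
  match keysSorted.find? (fun k => !(k == "") && PySem.Str.isIn k token) with
  | some key => (true, PySem.Str.replace token key (PySem.Dict.getD d key key), PySem.Dict.getD d key "")
  | none => (false, token, "")

def pvLoopA (d : PySem.Dict String String) (keysSorted : List String) :
    List Char → List Char → List (List (String × String)) → List Char × List (List (String × String))
  | [], out, recs => (out, recs)
  | ch :: rest, out, recs =>
    let out1 := out ++ [ch]
    if ch == '(' || ch == ',' then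
      if (match rest with | c :: _ => pvIsLCR c | [] => false) then
        pvLoopA d keysSorted rest out1 recs
      else
        let tokL := rest.takeWhile (fun c => !pvTokStop c)
        let token := String.ofList tokL
        let res := pvScanKeysA d keysSorted token
        let rec1 : List (String × String) :=
          [("original leaf node label", token),
           ("whether the original leaf node label has mnemonic", if res.1 then "yes" else "no"),
           ("current leaf node label", res.2.1),
           ("lineage information in the current leaf node label", res.2.2)]
        pvLoopA d keysSorted (rest.drop tokL.length) (out1 ++ res.2.1.toList) (recs ++ [rec1])
    else pvLoopA d keysSorted rest out1 recs
  termination_by cs => cs.length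
  decreasing_by all_goals (simp [List.length_drop]; try omega)

def relabel_newick_leaves_with_records (newick_text : String) (mapping : List (String × String)) : String × (List (List (String × String))) :=
  let d := PySem.Dict.ofList mapping
  let keysSorted := PySem.List.sorted d.keys (fun k => PySem.Str.len k) true
  let r := pvLoopA d keysSorted newick_text.toList [] []
  (String.ofList r.1, r.2)

-- ===== PORT B =====
inductive pvPiece where
  | lit : Char → pvPiece
  | tok : List Char → pvPiece
deriving DecidableEq, Repr

-- phase 1 of B: split the text into literal characters and leaf tokens
def pvTokenize : List Char → List pvPiece
  | [] => []
  | ch :: rest =>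
    if ch == '(' || ch == ',' then
      if (match rest with | c :: _ => pvIsLCR c | [] => false) then
        .lit ch :: pvTokenize rest
      else
        let tokL := rest.takeWhile (fun c => !pvTokStop c)
        .lit ch :: .tok tokL :: pvTokenize (rest.drop tokL.length)
    else .lit ch :: pvTokenize rest
  termination_by cs => cs.length
  decreasing_by all_goals (simp [List.length_drop]; try omega)

-- B's best_key: one max-scan over the keys in insertion order, no sort
def pvBestKey (keys : List String) (token : String) : Option String :=
  keys.foldl
    (fun best k =>
      if (!(k == "") && PySem.Str.isIn k token) &&
         (match best with | none => true | some b => decide (PySem.Str.len b < PySem.Str.len k))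
      then some k else best)
    none

def pvRender (d : PySem.Dict String String) : pvPiece → List Char
  | .lit c => [c]
  | .tok t =>
    let token := String.ofList t
    match pvBestKey d.keys token with
    | none => t
    | some b => (PySem.Str.replace token b (PySem.Dict.getD d b "")).toList

def pvRecord (d : PySem.Dict String String) : pvPiece → Option (List (String × String))
  | .lit _ => none
  | .tok t =>
    let token := String.ofList t
    match pvBestKey d.keys token with
    | none => some
        [("original leaf node label", token),
         ("whether the original leaf node label has mnemonic", "no"),
         ("current leaf node label", token),
         ("lineage information in the current leaf node label", "")]
    | some b =>
      let val := PySem.Dict.getD d b ""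
      some
        [("original leaf node label", token),
         ("whether the original leaf node label has mnemonic", "yes"),
         ("current leaf node label", PySem.Str.replace token b val),
         ("lineage information in the current leaf node label", val)]

def relabel_newick_leaves_with_records_alt (newick_text : String) (mapping : List (String × String)) : String × (List (List (String × String))) :=
  let d := PySem.Dict.ofList mapping
  let ps := pvTokenize newick_text.toList
  (String.ofList (ps.flatMap (pvRender d)), ps.filterMap (pvRecord d))

-- ===== PRECONDITION & SPEC =====
def Spec_relabel_newick_leaves_with_records (newick_text : String) (mapping : List (String × String)) (out : String × (List (List (String × String)))) : Prop := out = relabel_newick_leaves_with_records_alt newick_text mapping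
instance (newick_text : String) (mapping : List (String × String)) (out : String × (List (List (String × String)))) : Decidable (Spec_relabel_newick_leaves_with_records newick_text mapping out) := by unfold Spec_relabel_newick_leaves_with_records; infer_instance

-- ===== CLAIM (what is proved, stated in full; the proofs are below) =====
def Claim_equal_relabel_newick_leaves_with_records : Prop := ∀ (newick_text : String) (mapping : List (String × String)), Dom_relabel_newick_leaves_with_records newick_text mapping → Spec_relabel_newick_leaves_with_records newick_text mapping (relabel_newick_leaves_with_records newick_text mapping)

-- ===== LEMMAS AND PROOFS =====

def pvStep (P : String → Bool) (best : Option String) (k : String) : Option String :=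
  if P k && (match best with | none => true | some b => decide (PySem.Str.len b < PySem.Str.len k))
  then some k else best

lemma pvInsertBy_cons {α : Type} (before : α → α → Bool) (x y : α) (ys : List α) :
    PySem.List.insertBy before x (y :: ys)
      = if before x y then x :: y :: ys else y :: PySem.List.insertBy before x ys := rfl

lemma pvFind_insertBy (P : String → Bool) (x : String) :
    ∀ (s : List String), s.Pairwise (fun a b => PySem.Str.len b ≤ PySem.Str.len a) →
      (PySem.List.insertBy (fun a b => decide (PySem.Str.len b < PySem.Str.len a)) x s).find? P
        = pvStep P (s.find? P) x := by
  intro s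
  induction s with
  | nil =>
      intro _
      cases hP : P x <;> simp [PySem.List.insertBy, pvStep, hP]
  | cons y ys ih =>
      intro hp
      rw [List.pairwise_cons] at hp
      obtain ⟨hy, hys⟩ := hp
      rw [pvInsertBy_cons]
      by_cases hlt : PySem.Str.len y < PySem.Str.len x
      · rw [if_pos (by simpa using hlt)]
        cases hP : P x
        · simp [List.find?_cons, hP, pvStep]
        · rw [List.find?_cons_of_pos hP]
          cases hf : (y :: ys).find? P with
          | none => simp [pvStep, hP]
          | some b =>
              have hb : b ∈ y :: ys := List.mem_of_find?_eq_some hf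
              have hble : PySem.Str.len b ≤ PySem.Str.len y := by
                rcases List.mem_cons.mp hb with h | h
                · exact le_of_eq (by rw [h])
                · exact hy b h
              have hbx : b.length < x.length := by
                simpa using lt_of_le_of_lt hble hlt
              simp [pvStep, hP, hbx]
      · rw [if_neg (by simpa using hlt)]
        cases hPy : P y
        · rw [List.find?_cons_of_neg (by simp [hPy]), List.find?_cons_of_neg (by simp [hPy]), ih hys]
        · rw [List.find?_cons_of_pos hPy, List.find?_cons_of_pos hPy]
          simp only [pvStep]
          rw [if_neg]
          simp only [Bool.and_eq_true, decide_eq_true_eq, not_and]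
          intro _
          exact hlt

lemma pvFind_sorted_eq_best (P : String → Bool) (keys : List String) :
    (PySem.List.sorted keys (fun k => PySem.Str.len k) true).find? P = keys.foldl (pvStep P) none := by
  induction keys using List.reverseRecOn with
  | nil => simp [PySem.List.sorted_rev_eq_foldl_insertBy]
  | append_singleton ks x ih =>
      rw [PySem.List.sorted_rev_eq_foldl_insertBy, List.foldl_append, List.foldl_append]
      simp only [List.foldl_cons, List.foldl_nil]
      rw [← PySem.List.sorted_rev_eq_foldl_insertBy,
        pvFind_insertBy P x _ (PySem.List.sorted_pairwise_rev ks _), ih]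

lemma pvFoldl_pvStep_mem (P : String → Bool) :
    ∀ (ks : List String) (b : Option String) (x : String),
      ks.foldl (pvStep P) b = some x → b = some x ∨ x ∈ ks := by
  intro ks
  induction ks with
  | nil => intro b x h; exact Or.inl h
  | cons k ks ih =>
      intro b x h
      rcases ih (pvStep P b k) x h with h' | h'
      · unfold pvStep at h'
        split at h' <;> split at h' <;>
          first
            | exact Or.inl h'
            | (right; simp only [Option.some.injEq] at h'; simp [h'])
      · right; exact List.mem_cons_of_mem _ h'

lemma pvGetD_eq_of_mem_keys (d : PySem.Dict String String) (k : String)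
    (h : k ∈ d.keys) (a b : String) : PySem.Dict.getD d k a = PySem.Dict.getD d k b := by
  have hc : d.contains k = true := (PySem.Dict.contains_iff_mem_keys d k).mpr h
  rw [PySem.Dict.contains_eq_isSome_get?] at hc
  rw [PySem.Dict.getD_eq_get?_getD, PySem.Dict.getD_eq_get?_getD]
  cases hg : d.get? k with
  | none => rw [hg] at hc; simp at hc
  | some v => rfl

lemma pvBestKey_eq_foldl (keys : List String) (token : String) :
    pvBestKey keys token = keys.foldl (pvStep (fun k => !(k == "") && PySem.Str.isIn k token)) none := rfl

lemma pvBestKey_mem (keys : List String) (token : String) (b : String)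
    (h : pvBestKey keys token = some b) : b ∈ keys := by
  rw [pvBestKey_eq_foldl] at h
  rcases pvFoldl_pvStep_mem _ keys none b h with h' | h'
  · cases h'
  · exact h'

lemma pvRender_lit (d : PySem.Dict String String) (c : Char) : pvRender d (.lit c) = [c] := rfl

lemma pvRecord_lit (d : PySem.Dict String String) (c : Char) : pvRecord d (.lit c) = none := rfl

-- B's render of a token is A's replaced string
lemma pvScanA_render (d : PySem.Dict String String) (t : List Char) :
    pvRender d (.tok t)
      = (pvScanKeysA d (PySem.List.sorted d.keys (fun k => PySem.Str.len k) true) (String.ofList t)).2.1.toList := by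
  unfold pvRender pvScanKeysA
  rw [pvFind_sorted_eq_best, ← pvBestKey_eq_foldl]
  cases hbest : pvBestKey d.keys (String.ofList t) with
  | none => simp [hbest]
  | some b =>
      have hb : b ∈ d.keys := pvBestKey_mem d.keys (String.ofList t) b hbest
      simp [hbest, pvGetD_eq_of_mem_keys d b hb b ""]

-- B's record of a token is A's record
lemma pvScanA_rec (d : PySem.Dict String String) (t : List Char) :
    pvRecord d (.tok t)
      = some
        [("original leaf node label", String.ofList t),
         ("whether the original leaf node label has mnemonic",
           if (pvScanKeysA d (PySem.List.sorted d.keys (fun k => PySem.Str.len k) true) (String.ofList t)).1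
           then "yes" else "no"),
         ("current leaf node label",
           (pvScanKeysA d (PySem.List.sorted d.keys (fun k => PySem.Str.len k) true) (String.ofList t)).2.1),
         ("lineage information in the current leaf node label",
           (pvScanKeysA d (PySem.List.sorted d.keys (fun k => PySem.Str.len k) true) (String.ofList t)).2.2)] := by
  unfold pvRecord pvScanKeysA
  rw [pvFind_sorted_eq_best, ← pvBestKey_eq_foldl]
  cases hbest : pvBestKey d.keys (String.ofList t) with
  | none => simp [hbest]
  | some b =>
      have hb : b ∈ d.keys := pvBestKey_mem d.keys (String.ofList t) b hbest
      simp [hbest, pvGetD_eq_of_mem_keys d b hb b ""]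

-- the fused loop of A equals B's tokenize-then-render/report phases
lemma pvLoopA_spec (d : PySem.Dict String String) :
    ∀ (cs out : List Char) (recs : List (List (String × String))),
      pvLoopA d (PySem.List.sorted d.keys (fun k => PySem.Str.len k) true) cs out recs
        = (out ++ (pvTokenize cs).flatMap (pvRender d), recs ++ (pvTokenize cs).filterMap (pvRecord d)) := by
  intro cs out recs
  fun_induction pvLoopA d (PySem.List.sorted d.keys (fun k => PySem.Str.len k) true) cs out recs with
  | case1 out recs => simp [pvTokenize]
  | case2 ch rest out recs out1 hcond hlook ih =>
      rw [pvTokenize.eq_def, ih]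
      simp [hcond, hlook, pvRender, pvRecord, out1]
  | case3 ch rest out recs out1 hcond hlook tokL token res rec1 ih =>
      rw [pvTokenize.eq_def, ih]
      simp only [res, rec1, out1, token, tokL, dite_eq_ite]
      rw [if_pos hcond, if_neg hlook]
      simp only [List.flatMap_cons, List.filterMap_cons, pvRender_lit, pvRecord_lit,
        pvScanA_render, pvScanA_rec]
      simp
  | case4 ch rest out recs out1 hcond ih =>
      rw [pvTokenize.eq_def, ih]
      simp [hcond, pvRender, pvRecord, out1]

-- ===== VERDICT (by name: the statement is the Claim_ definition above) =====
theorem relabel_newick_leaves_with_records_spec : Claim_equal_relabel_newick_leaves_with_records := by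
  intro newick_text mapping _
  unfold Spec_relabel_newick_leaves_with_records relabel_newick_leaves_with_records relabel_newick_leaves_with_records_alt
  simp only [pvLoopA_spec (PySem.Dict.ofList mapping), List.nil_append]
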